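-- pv_equiv track=rewrite | github.com/programmers-algorithm-study-Team02/python-algorithm-study | Week4/외톨이_알파벳/yhyang.py | solution
-- ===== SOURCE A (Python) =====
-- def solution(input_string):
--     seen = set()
--     lonely = set()
--     prev = None
--
--     for ch in input_string:
--         if ch != prev:
--             if ch in seen:
--                 lonely.add(ch)
--             seen.add(ch)
--             prev = ch
--
--     if not lonely:
--         return "N"
--     return "".join(sorted(lonely))
-- ===== SOURCE B (Python) =====
-- def solution(input_string):
--     # A letter is "lonely" iff its occurrences are NOT one contiguous block:
--     # the block of length count(c) starting at the first occurrence would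
--     # have to be all c's. No run scanning needed.
--     chars = list(input_string)
--     lonely = [c for c in sorted(set(chars))
--               if chars[chars.index(c):chars.index(c) + chars.count(c)] != [c] * chars.count(c)]
--     return "".join(lonely) if lonely else "N"
-- ===== Notes on version B (the rewrite author's own statement) =====
-- stated objective: alternative
-- what changed: A scans the string once tracking seen/lonely sets and the previous run's char; B does no run detection at all: for each distinct letter it tests whether the occurrences form one contiguous block by comparing the slice of length count(c) starting at the first index of c against [c]*count(c), collecting the letters that fail.
import Mathlib
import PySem

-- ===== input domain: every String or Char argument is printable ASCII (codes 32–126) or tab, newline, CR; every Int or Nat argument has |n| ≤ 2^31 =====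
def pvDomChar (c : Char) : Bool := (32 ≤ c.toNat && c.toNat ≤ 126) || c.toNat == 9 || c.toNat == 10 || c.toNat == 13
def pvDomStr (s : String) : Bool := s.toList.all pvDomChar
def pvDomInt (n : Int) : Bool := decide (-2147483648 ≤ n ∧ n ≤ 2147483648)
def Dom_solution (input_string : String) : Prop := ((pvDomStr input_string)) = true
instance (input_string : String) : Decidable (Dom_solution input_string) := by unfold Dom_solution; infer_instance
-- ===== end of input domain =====

-- B replaces A's online run scan (seen/lonely sets, prev char) by a per-letter contiguity test: the occurrences of c form one block iff the slice of length count(c) at the first index of c is all c; objective: alternative, same result.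


-- ===== PORT A =====
-- A's loop body: state (seen, lonely, prev); Python checks 'ch in seen' before 'seen.add(ch)'
def solAStep (st : PySem.Set Char × PySem.Set Char × Option Char) (ch : Char) :
    PySem.Set Char × PySem.Set Char × Option Char :=
  match st with
  | (seen, lonely, prev) =>
    if some ch ≠ prev then
      (PySem.Set.add seen ch,
       if PySem.Set.contains seen ch then PySem.Set.add lonely ch else lonely,
       some ch)
    else (seen, lonely, prev)

def solution (input_string : String) : String :=
  let st := input_string.toList.foldl solAStep (PySem.Set.empty, PySem.Set.empty, none)
  let lonely := st.2.1
  if lonely.isEmpty then "N"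
  else String.ofList (PySem.List.sorted lonely (fun x => x) false)

-- ===== PORT B =====
def solution_alt (input_string : String) : String :=
  let chars := input_string.toList
  -- for each distinct letter (sorted), test whether its occurrences are one contiguous block
  let lonely := (PySem.List.sorted (PySem.Set.ofList chars) (fun x => x) false).filter
    (fun c =>
      -- chars.index(c): c is drawn from set(chars), so .index never raises; getD 0 is unreachable
      let i := (PySem.List.index? chars c).getD 0
      let cnt := PySem.List.count chars c
      decide (PySem.List.slice chars (some (i : Int)) (some ((i : Int) + (cnt : Int)))
              ≠ List.replicate cnt c))
  if lonely.isEmpty then "N" else String.ofList lonely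

-- ===== PRECONDITION & SPEC =====
def Spec_solution (input_string : String) (out : String) : Prop := out = solution_alt input_string
instance (input_string : String) (out : String) : Decidable (Spec_solution input_string out) := by unfold Spec_solution; infer_instance

-- ===== CLAIM (what is proved, stated in full; the proofs are below) =====
def Claim_equal_solution : Prop := ∀ (input_string : String), Dom_solution input_string → Spec_solution input_string (solution input_string)

-- ===== LEMMAS AND PROOFS =====

-- the compressed run sequence (one char per maximal run), parameterised by the previous char
def comp : Option Char → List Char → List Char
  | _, [] => []
  | p, c :: cs => if some c = p then comp p cs else c :: comp (some c) cs

-- membership in the seen- and lonely-components of A's fold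
lemma fold_mem (cs : List Char) : ∀ (seen lonely : PySem.Set Char) (prev : Option Char),
    (∀ x, x ∈ (cs.foldl solAStep (seen, lonely, prev)).1 ↔ x ∈ seen ∨ x ∈ comp prev cs) ∧
    (∀ x, x ∈ (cs.foldl solAStep (seen, lonely, prev)).2.1 ↔
      x ∈ lonely ∨ (x ∈ comp prev cs ∧ (x ∈ seen ∨ 2 ≤ (comp prev cs).count x))) := by
  induction cs with
  | nil => intro seen lonely prev; constructor <;> intro x <;> simp [comp]
  | cons c cs ih =>
      intro seen lonely prev
      by_cases h : some c = prev
      · have hstep : solAStep (seen, lonely, prev) c = (seen, lonely, prev) := by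
          simp [solAStep, h]
        simp only [List.foldl_cons, hstep, comp, if_pos h]
        exact ih seen lonely prev
      · have hstep : solAStep (seen, lonely, prev) c =
            (PySem.Set.add seen c,
             if PySem.Set.contains seen c then PySem.Set.add lonely c else lonely,
             some c) := by simp [solAStep, h]
        simp only [List.foldl_cons, hstep, comp, if_neg h]
        obtain ⟨ih1, ih2⟩ := ih (PySem.Set.add seen c)
          (if PySem.Set.contains seen c then PySem.Set.add lonely c else lonely) (some c)
        have hL : ∀ x, (x ∈ if PySem.Set.contains seen c then PySem.Set.add lonely c else lonely)
            ↔ (x ∈ lonely ∨ (x = c ∧ c ∈ seen)) := by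
          intro x
          by_cases hc : c ∈ seen
          · have : PySem.Set.contains seen c = true := (PySem.Set.contains_iff seen c).mpr hc
            simp [PySem.Set.mem_add, hc]
          · have : PySem.Set.contains seen c = false :=
              Bool.eq_false_iff.mpr (fun h' => hc ((PySem.Set.contains_iff seen c).mp h'))
            simp [hc]
        constructor
        · intro x
          rw [ih1 x, PySem.Set.mem_add]
          simp only [List.mem_cons]
          tauto
        · intro x
          rw [ih2 x, hL x, PySem.Set.mem_add]
          by_cases hx : x = c
          · rw [hx]
            simp only [List.mem_cons, List.count_cons_self]
            have hmem : c ∈ comp (some c) cs ↔ 2 ≤ List.count c (comp (some c) cs) + 1 := by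
              rw [← List.count_pos_iff]; omega
            tauto
          · have hxc : ¬ c = x := fun h' => hx h'.symm
            have hcnt : (c :: comp (some c) cs).count x = (comp (some c) cs).count x := by
              simp [hxc]
            simp only [List.mem_cons, hcnt]
            tauto

-- the lonely component stays Nodup
lemma fold_nodup (cs : List Char) : ∀ (seen lonely : PySem.Set Char) (prev : Option Char),
    lonely.Nodup → (cs.foldl solAStep (seen, lonely, prev)).2.1.Nodup := by
  induction cs with
  | nil => intro _ _ _ h; simpa using h
  | cons c cs ih =>
      intro seen lonely prev h
      simp only [List.foldl_cons, solAStep]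
      split
      · apply ih
        split
        · exact PySem.Set.nodup_add _ _ h
        · exact h
      · exact ih _ _ _ h

-- every element of the compressed sequence comes from the list
lemma comp_subset (cs : List Char) : ∀ p, comp p cs ⊆ cs := by
  induction cs with
  | nil => intro p; simp [comp]
  | cons c cs ih =>
      intro p
      simp only [comp]
      split
      · exact (ih p).trans (List.subset_cons_self c cs)
      · exact List.cons_subset_cons c (ih (some c))

-- the previous-char parameter after consuming xs
def compPrev (p : Option Char) (xs : List Char) : Option Char :=
  match xs.getLast? with
  | some x => some x
  | none => p

-- comp distributes over append
lemma compPrev_nil (p : Option Char) : compPrev p [] = p := rfl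

lemma compPrev_cons (p : Option Char) (x : Char) (xs : List Char) :
    compPrev p (x :: xs) = compPrev (some x) xs := by
  cases xs with
  | nil => rfl
  | cons y ys =>
      unfold compPrev
      rw [List.getLast?_cons_cons]
      cases hz : (y :: ys).getLast? with
      | none => simp at hz
      | some z => rfl

lemma comp_append (xs : List Char) : ∀ (p : Option Char) (ys : List Char),
    comp p (xs ++ ys) = comp p xs ++ comp (compPrev p xs) ys := by
  induction xs with
  | nil => intro p ys; simp [comp, compPrev_nil]
  | cons x xs ih =>
      intro p ys
      rw [compPrev_cons, List.cons_append]
      by_cases h : some x = p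
      · have h1 : comp p (x :: (xs ++ ys)) = comp p (xs ++ ys) := by
          rw [show comp p (x :: (xs ++ ys)) =
            if some x = p then comp p (xs ++ ys) else x :: comp (some x) (xs ++ ys) from rfl,
            if_pos h]
        have h2 : comp p (x :: xs) = comp p xs := by
          rw [show comp p (x :: xs) =
            if some x = p then comp p xs else x :: comp (some x) xs from rfl, if_pos h]
        rw [h1, h2, ih p ys, h]
      · have h1 : comp p (x :: (xs ++ ys)) = x :: comp (some x) (xs ++ ys) := by
          rw [show comp p (x :: (xs ++ ys)) =
            if some x = p then comp p (xs ++ ys) else x :: comp (some x) (xs ++ ys) from rfl,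
            if_neg h]
        have h2 : comp p (x :: xs) = x :: comp (some x) xs := by
          rw [show comp p (x :: xs) =
            if some x = p then comp p xs else x :: comp (some x) xs from rfl, if_neg h]
        rw [h1, h2, ih (some x) ys, List.cons_append]

-- a char different from the pending prev is in comp iff it is in the list
lemma mem_comp_of_ne (c : Char) (cs : List Char) : ∀ p, p ≠ some c → (c ∈ comp p cs ↔ c ∈ cs) := by
  induction cs with
  | nil => intro p _; simp [comp]
  | cons x xs ih =>
      intro p hp
      by_cases h : some x = p
      · have hxc : ¬ c = x := by intro e; exact hp (by rw [← h, e])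
        have hcomp : comp p (x :: xs) = comp p xs := by
          rw [show comp p (x :: xs) =
            if some x = p then comp p xs else x :: comp (some x) xs from rfl, if_pos h]
        rw [hcomp, ih p hp, List.mem_cons]
        constructor
        · exact Or.inr
        · rintro (e | m)
          · exact absurd e hxc
          · exact m
      · have hcomp : comp p (x :: xs) = x :: comp (some x) xs := by
          rw [show comp p (x :: xs) =
            if some x = p then comp p xs else x :: comp (some x) xs from rfl, if_neg h]
        by_cases hxc : x = c
        · subst hxc; rw [hcomp]; simp
        · rw [hcomp, List.mem_cons, List.mem_cons,
            ih (some x) (fun e => hxc (Option.some.inj e))]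

-- the key bridge: no further run of c after a c-run just ended  ↔  the next count-of-c chars are all c
lemma no_more_runs_iff (c : Char) (B : List Char) :
    (comp (some c) B).count c = 0 ↔ B.take (B.count c) = List.replicate (B.count c) c := by
  induction B with
  | nil => simp [comp]
  | cons x xs ih =>
      by_cases hxc : x = c
      · subst hxc
        have h1 : comp (some x) (x :: xs) = comp (some x) xs := by
          rw [show comp (some x) (x :: xs) =
            if some x = some x then comp (some x) xs else x :: comp (some x) xs from rfl,
            if_pos rfl]
        rw [h1]
        simp only [List.count_cons_self, List.take_succ_cons, List.replicate_succ,
          List.cons.injEq, true_and]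
        exact ih
      · have hcx : ¬ c = x := fun e => hxc e.symm
        have hcompx : comp (some c) (x :: xs) = x :: comp (some x) xs := by
          rw [show comp (some c) (x :: xs) =
            if some x = some c then comp (some c) xs else x :: comp (some x) xs from rfl,
            if_neg (by simp [hxc])]
        have hcount : (x :: xs).count c = xs.count c := by
          simp [hxc]
        have hcnt : (x :: comp (some x) xs).count c = (comp (some x) xs).count c := by
          simp [hxc]
        rw [hcompx, hcnt, hcount]
        cases hn : xs.count c with
        | zero =>
            have hnotmem : c ∉ xs := by
              intro m; have := List.count_pos_iff.mpr m; omega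
            have hnc : c ∉ comp (some x) xs := by
              rw [mem_comp_of_ne c xs (some x) (fun e => hxc (Option.some.inj e))]
              exact hnotmem
            simp [List.count_eq_zero.mpr hnc]
        | succ n =>
            have hmem : c ∈ xs := List.count_pos_iff.mp (by omega)
            have hmemc : c ∈ comp (some x) xs := by
              rw [mem_comp_of_ne c xs (some x) (fun e => hxc (Option.some.inj e))]
              exact hmem
            have hpos : (comp (some x) xs).count c ≠ 0 := by
              have := List.count_pos_iff.mpr hmemc; omega
            simp only [List.take_succ_cons, List.replicate_succ]
            constructor
            · intro h; exact absurd h hpos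
            · intro h
              exact absurd (by injection h : x = c) hxc

-- B's per-letter test agrees with "c starts at least two runs" for c in the list
lemma cond_iff (cs : List Char) (c : Char) (hc : c ∈ cs) :
    (PySem.List.slice cs (some (((PySem.List.index? cs c).getD 0 : Nat) : Int))
        (some ((((PySem.List.index? cs c).getD 0 : Nat) : Int) + ((PySem.List.count cs c : Nat) : Int)))
      ≠ List.replicate (PySem.List.count cs c) c)
    ↔ 2 ≤ (comp none cs).count c := by
  obtain ⟨k, hk⟩ := Option.isSome_iff_exists.mp ((PySem.List.index?_isSome_iff cs c).mpr hc)
  obtain ⟨A, B, hAB, hlen, hnA⟩ := (PySem.List.index?_eq_some_iff cs c k).mp hk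
  have hgetD : (PySem.List.index? cs c).getD 0 = k := by rw [hk]; rfl
  have hcount : PySem.List.count cs c = B.count c + 1 := by
    have h0 : PySem.List.count cs c = cs.count c := by simp [PySem.List.count_eq]
    have hA0 : A.count c = 0 := List.count_eq_zero.mpr hnA
    rw [h0, hAB]
    simp [hA0]
  have hdrop : cs.drop k = c :: B := by
    rw [hAB, ← hlen]
    simp
  -- evaluate the slice
  have hslice : PySem.List.slice cs (some ((k : Nat) : Int))
      (some (((k : Nat) : Int) + ((PySem.List.count cs c : Nat) : Int)))
      = (cs.drop k).take (PySem.List.count cs c) :=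
    PySem.List.slice_natCast_add cs k (PySem.List.count cs c)
  rw [hgetD, hslice, hdrop, hcount]
  simp only [List.take_succ_cons, List.replicate_succ]
  -- evaluate A's run count
  have hcomp : (comp none cs).count c = 1 + (comp (some c) B).count c := by
    rw [hAB, comp_append]
    have hA : (comp none A).count c = 0 := by
      refine List.count_eq_zero.mpr ?_
      intro m; exact hnA (comp_subset A none m)
    have hprev : compPrev none A ≠ some c := by
      unfold compPrev
      cases hA' : A.getLast? with
      | none => simp
      | some x =>
          have hx : x ∈ A := List.mem_of_getLast? hA'
          intro e
          exact hnA (by rwa [Option.some.inj e] at hx)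
    have hcons : comp (compPrev none A) (c :: B) = c :: comp (some c) B := by
      rw [show comp (compPrev none A) (c :: B) =
        if some c = compPrev none A then comp (compPrev none A) B
        else c :: comp (some c) B from rfl, if_neg (fun e => hprev e.symm)]
    rw [List.count_append, hA, hcons]
    simp [List.count_cons_self]
    omega
  rw [hcomp]
  constructor
  · intro hne
    have htk : B.take (B.count c) ≠ List.replicate (B.count c) c := by
      intro e; exact hne (by rw [e])
    have hne0 : (comp (some c) B).count c ≠ 0 :=
      fun h => htk ((no_more_runs_iff c B).mp h)
    omega
  · intro h2 he
    have htail : B.take (B.count c) = List.replicate (B.count c) c := by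
      injection he
    have h0 := (no_more_runs_iff c B).mpr htail
    omega

-- ===== VERDICT (by name: the statement is the Claim_ definition above) =====
theorem solution_spec : Claim_equal_solution := by
  intro s _
  unfold Spec_solution solution solution_alt
  simp only []
  set cs := s.toList with hcs
  -- A's lonely list
  obtain ⟨_, hmemA⟩ := fold_mem cs PySem.Set.empty PySem.Set.empty none
  set lA := (cs.foldl solAStep (PySem.Set.empty, PySem.Set.empty, none)).2.1 with hlA
  have hA : ∀ x, x ∈ lA ↔ 2 ≤ (comp none cs).count x := by
    intro x
    rw [hlA, hmemA x]
    constructor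
    · rintro (h | ⟨_, h | h⟩) <;> first | (exact h) | simp [PySem.Set.empty] at h
    · intro h
      exact Or.inr ⟨List.count_pos_iff.mp (by omega), Or.inr h⟩
  have hAnd : lA.Nodup := fold_nodup cs _ _ _ (by simp [PySem.Set.empty])
  -- B's lonely list
  set lB := (PySem.List.sorted (PySem.Set.ofList cs) (fun x => x) false).filter
    (fun c =>
      decide (PySem.List.slice cs (some (((PySem.List.index? cs c).getD 0 : Nat) : Int))
          (some ((((PySem.List.index? cs c).getD 0 : Nat) : Int) + ((PySem.List.count cs c : Nat) : Int)))
        ≠ List.replicate (PySem.List.count cs c) c)) with hlB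
  have hBpw : lB.Pairwise (· < ·) := by
    rw [hlB]
    exact (PySem.List.sorted_ofList_pairwise_lt cs).filter _
  have hBnd : lB.Nodup := hBpw.imp (fun h => ne_of_lt h)
  have hB : ∀ x, x ∈ lB ↔ 2 ≤ (comp none cs).count x := by
    intro x
    rw [hlB, List.mem_filter, PySem.List.mem_sorted, PySem.Set.mem_ofList, decide_eq_true_eq]
    constructor
    · rintro ⟨hm, hcond⟩
      exact (cond_iff cs x hm).mp hcond
    · intro h
      have hm : x ∈ cs := by
        have : x ∈ comp none cs := List.count_pos_iff.mp (by omega)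
        exact comp_subset cs none this
      exact ⟨hm, (cond_iff cs x hm).mpr h⟩
  -- the two lists have the same members; B's is already strictly sorted
  have hperm : lB.Perm lA := by
    rw [List.perm_ext_iff_of_nodup hBnd hAnd]
    intro x; rw [hA x, hB x]
  have hsorted : PySem.List.sorted lA (fun x => x) false = lB :=
    PySem.List.sorted_eq_of_perm_of_pairwise_lt lA lB (fun x => x) hperm hBpw
  have hempty : lA.isEmpty = lB.isEmpty := by
    rw [Bool.eq_iff_iff]
    simp only [List.isEmpty_iff]
    constructor
    · intro h'; exact (h' ▸ hperm : lB.Perm ([] : List Char)).eq_nil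
    · intro h'; exact ((h' ▸ hperm : ([] : List Char).Perm lA)).symm.eq_nil
  rw [hempty, hsorted]
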